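-- pv_equiv track=rewrite | github.com/justezy0210/green-rice-web | scripts/pilot-region-extract.py | pick_sample_ogs
-- ===== SOURCE A (Python) =====
-- def pick_sample_ogs(
--     og_coords: dict,
--     og_descriptions: dict,
--     sample_size: int,
-- ) -> list[tuple[str, str]]:
--     """Pick diverse sample: single/tandem/multi/no-IRGSP. Returns [(og_id, category)]."""
--     single_gene = []
--     tandem = []
--     multi_copy = []
--     no_irgsp = []
--
--     for og_id, cultivars in og_coords.items():
--         total_genes = sum(len(genes) for genes in cultivars.values())
--         has_irgsp = og_id in og_descriptions and og_descriptions[og_id].get("transcripts")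
--
--         if not has_irgsp:
--             no_irgsp.append(og_id)
--             continue
--
--         if total_genes <= len(cultivars):  # roughly 1 per cultivar
--             single_gene.append(og_id)
--         elif total_genes <= len(cultivars) * 3:
--             tandem.append(og_id)
--         else:
--             multi_copy.append(og_id)
--
--     per_category = sample_size // 4
--     samples = []
--     for ogs, cat in [
--         (single_gene, "single_gene"),
--         (tandem, "tandem"),
--         (multi_copy, "multi_copy"),
--         (no_irgsp, "no_irgsp"),
--     ]:
--         for og_id in ogs[:per_category]:
--             samples.append((og_id, cat))
--     return samples
-- ===== SOURCE B (Python) =====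
-- def pick_sample_ogs(
--     og_coords: dict,
--     og_descriptions: dict,
--     sample_size: int,
-- ) -> list[tuple[str, str]]:
--     """Pick diverse sample: single/tandem/multi/no-IRGSP. Returns [(og_id, category)]."""
--     cats = ("single_gene", "tandem", "multi_copy", "no_irgsp")
--
--     def rank(og_id, cultivars):
--         desc = og_descriptions.get(og_id)
--         if not (desc is not None and desc.get("transcripts")):
--             return 3
--         total_genes = sum(len(genes) for genes in cultivars.values())
--         if total_genes <= len(cultivars):
--             return 0
--         if total_genes <= len(cultivars) * 3:
--             return 1
--         return 2
--
--     # stable sort by category rank groups the ids category-major, keeping input order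
--     ranked = sorted([(rank(k, v), k) for k, v in og_coords.items()], key=lambda t: t[0])
--     per = sample_size // 4
--     out = []
--     rest = ranked
--     while rest:
--         r = rest[0][0]
--         i = 1
--         while i < len(rest) and rest[i][0] == r:
--             i += 1
--         out.extend((og, cats[r]) for _, og in rest[:i][:per])
--         rest = rest[i:]
--     return out
-- ===== Notes on version B (the rewrite author's own statement) =====
-- stated objective: alternative
-- what changed: Replaced A's four append-as-you-go bucket lists plus per-bucket slicing with a stable sort of (rank, og_id) pairs by category rank followed by a single grouped scan that slices each contiguous run; stability of the sort preserves input order within each category.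
import Mathlib
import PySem

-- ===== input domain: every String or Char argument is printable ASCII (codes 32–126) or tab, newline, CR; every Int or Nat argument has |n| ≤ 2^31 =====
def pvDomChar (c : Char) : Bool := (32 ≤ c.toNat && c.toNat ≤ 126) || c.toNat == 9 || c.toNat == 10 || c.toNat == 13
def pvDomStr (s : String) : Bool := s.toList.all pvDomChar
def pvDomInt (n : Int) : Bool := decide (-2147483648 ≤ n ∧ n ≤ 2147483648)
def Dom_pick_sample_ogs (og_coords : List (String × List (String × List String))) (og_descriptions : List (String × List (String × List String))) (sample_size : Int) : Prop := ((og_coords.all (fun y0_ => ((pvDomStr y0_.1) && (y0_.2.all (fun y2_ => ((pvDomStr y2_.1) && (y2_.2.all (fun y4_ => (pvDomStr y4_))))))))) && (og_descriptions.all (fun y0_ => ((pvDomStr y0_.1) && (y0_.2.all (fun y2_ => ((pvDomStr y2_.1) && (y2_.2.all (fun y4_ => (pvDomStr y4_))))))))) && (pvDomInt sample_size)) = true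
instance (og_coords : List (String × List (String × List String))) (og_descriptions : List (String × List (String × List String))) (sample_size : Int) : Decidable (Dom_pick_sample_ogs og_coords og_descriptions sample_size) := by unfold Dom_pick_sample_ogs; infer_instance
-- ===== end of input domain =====

-- B replaces A's four append-as-you-go bucket lists plus per-bucket slicing by a stable sort of
-- (rank, og_id) pairs by category rank followed by one grouped scan slicing each contiguous run
-- (objective: alternative algorithm, same observable result).

-- ===== PORT A =====
-- truthiness of: og_id in og_descriptions and og_descriptions[og_id].get("transcripts")
def pvHasIrgsp (og_descriptions : List (String × List (String × List String)))
    (og_id : String) : Bool :=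
  match og_descriptions.find? (fun q => q.1 == og_id) with
  | some d =>
    match d.2.find? (fun q => q.1 == "transcripts") with
    | some t => !t.2.isEmpty
    | none => false
  | none => false

-- step of A's loop over og_coords.items(): accumulator = (single_gene, tandem, multi_copy, no_irgsp)
def pvStepA (og_descriptions : List (String × List (String × List String)))
    (acc : List String × List String × List String × List String)
    (p : String × List (String × List String)) :
    List String × List String × List String × List String :=
  let (sg, td, mc, ni) := acc
  let total_genes : Int := p.2.foldl (fun s g => s + (g.2.length : Int)) 0
  let has_irgsp : Bool := pvHasIrgsp og_descriptions p.1
  if !has_irgsp then (sg, td, mc, ni ++ [p.1])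
  else if total_genes ≤ (p.2.length : Int) then (sg ++ [p.1], td, mc, ni)
  else if total_genes ≤ (p.2.length : Int) * 3 then (sg, td ++ [p.1], mc, ni)
  else (sg, td, mc ++ [p.1], ni)

def pick_sample_ogs (og_coords : List (String × List (String × List String))) (og_descriptions : List (String × List (String × List String))) (sample_size : Int) : List (String × String) :=
  let bs := og_coords.foldl (pvStepA og_descriptions) ([], [], [], [])
  let per_category := PySem.Int.floordiv sample_size 4
  [(bs.1, "single_gene"), (bs.2.1, "tandem"), (bs.2.2.1, "multi_copy"), (bs.2.2.2, "no_irgsp")].foldl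
    (fun samples pc =>
      (PySem.List.slice pc.1 none (some per_category)).foldl (fun s og => s ++ [(og, pc.2)]) samples) []

-- ===== PORT B =====
-- B's rank helper: category index 0..3 of one (og_id, cultivars) entry
def pvRank (og_descriptions : List (String × List (String × List String)))
    (p : String × List (String × List String)) : Int :=
  if !(pvHasIrgsp og_descriptions p.1) then 3
  else
    let total_genes : Int := p.2.foldl (fun s g => s + (g.2.length : Int)) 0
    if total_genes ≤ (p.2.length : Int) then 0
    else if total_genes ≤ (p.2.length : Int) * 3 then 1
    else 2

-- cats[r] tuple indexing
def pvCatName (r : Int) : String :=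
  if r == 0 then "single_gene" else if r == 1 then "tandem"
  else if r == 2 then "multi_copy" else "no_irgsp"

-- B's outer while loop over the sorted list: peel one contiguous run per iteration, slice it
def pvEmitRuns (per : Int) : List (Int × String) → List (String × String)
  | [] => []
  | q :: t =>
    let run : List String := q.2 :: (t.takeWhile (fun w => w.1 == q.1)).map (fun w => w.2)
    (PySem.List.slice run none (some per)).map (fun og => (og, pvCatName q.1))
      ++ pvEmitRuns per (t.dropWhile (fun w => w.1 == q.1))
termination_by l => l.length
decreasing_by
  simp only [List.length_cons]
  exact Nat.lt_succ_of_le (List.length_dropWhile_le _ _)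

def pick_sample_ogs_alt (og_coords : List (String × List (String × List String))) (og_descriptions : List (String × List (String × List String))) (sample_size : Int) : List (String × String) :=
  let ranked := PySem.List.sorted
    (og_coords.map (fun p => (pvRank og_descriptions p, p.1))) (fun t => t.1)
  let per := PySem.Int.floordiv sample_size 4
  pvEmitRuns per ranked

-- ===== PRECONDITION & SPEC =====
def Spec_pick_sample_ogs (og_coords : List (String × List (String × List String))) (og_descriptions : List (String × List (String × List String))) (sample_size : Int) (out : List (String × String)) : Prop := out = pick_sample_ogs_alt og_coords og_descriptions sample_size
instance (og_coords : List (String × List (String × List String))) (og_descriptions : List (String × List (String × List String))) (sample_size : Int) (out : List (String × String)) : Decidable (Spec_pick_sample_ogs og_coords og_descriptions sample_size out) := by unfold Spec_pick_sample_ogs; infer_instance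

-- ===== CLAIM (what is proved, stated in full; the proofs are below) =====
def Claim_equal_pick_sample_ogs : Prop := ∀ (og_coords : List (String × List (String × List String))) (og_descriptions : List (String × List (String × List String))) (sample_size : Int), Dom_pick_sample_ogs og_coords og_descriptions sample_size → Spec_pick_sample_ogs og_coords og_descriptions sample_size (pick_sample_ogs og_coords og_descriptions sample_size)

-- ===== LEMMAS AND PROOFS =====

-- the ids of rank r, in input order
def pvSelR (d : List (String × List (String × List String))) (r : Int)
    (l : List (String × List (String × List String))) : List String :=
  (l.filter (fun p => pvRank d p == r)).map (fun p => p.1)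

-- the category-major output block for a bucket
def pvOut (per : Int) (c : String) (u : List String) : List (String × String) :=
  (PySem.List.slice u none (some per)).map (fun og => (og, c))

-- the four filter blocks in rank order (what the stable sort produces)
def pvF (l : List (Int × String)) : List (Int × String) :=
  l.filter (fun w => w.1 == 0) ++ (l.filter (fun w => w.1 == 1) ++
    (l.filter (fun w => w.1 == 2) ++ l.filter (fun w => w.1 == 3)))

theorem pvRank_cases (d : List (String × List (String × List String)))
    (p : String × List (String × List String)) :
    pvRank d p = 0 ∨ pvRank d p = 1 ∨ pvRank d p = 2 ∨ pvRank d p = 3 := by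
  unfold pvRank; dsimp only; split_ifs <;> simp

theorem pvStepA_eq (d : List (String × List (String × List String)))
    (sg td mc ni : List String) (p : String × List (String × List String)) :
    pvStepA d (sg, td, mc, ni) p =
      (sg ++ (if pvRank d p == 0 then [p.1] else []),
       td ++ (if pvRank d p == 1 then [p.1] else []),
       mc ++ (if pvRank d p == 2 then [p.1] else []),
       ni ++ (if pvRank d p == 3 then [p.1] else [])) := by
  unfold pvStepA pvRank
  by_cases h : pvHasIrgsp d p.1
  · by_cases h1 : p.2.foldl (fun s g => s + (g.2.length : Int)) 0 ≤ (p.2.length : Int)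
    · simp [h, h1]
    · by_cases h2 : p.2.foldl (fun s g => s + (g.2.length : Int)) 0 ≤ (p.2.length : Int) * 3
      · simp [h, h1, h2]
      · simp [h, h1, h2]
  · simp [h]

theorem pvSelR_cons (d : List (String × List (String × List String))) (r : Int)
    (p : String × List (String × List String)) (l : List (String × List (String × List String))) :
    pvSelR d r (p :: l) =
      (if pvRank d p == r then [p.1] else []) ++ pvSelR d r l := by
  by_cases h : pvRank d p == r <;> simp [pvSelR, h]

theorem pvFoldA_eq (d : List (String × List (String × List String)))
    (l : List (String × List (String × List String))) (sg td mc ni : List String) :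
    l.foldl (pvStepA d) (sg, td, mc, ni) =
      (sg ++ pvSelR d 0 l, td ++ pvSelR d 1 l, mc ++ pvSelR d 2 l, ni ++ pvSelR d 3 l) := by
  induction l generalizing sg td mc ni with
  | nil => simp [pvSelR]
  | cons p l ih =>
    simp only [List.foldl_cons, pvStepA_eq, ih, pvSelR_cons, List.append_assoc]

theorem pickA_norm (og_coords og_descriptions : List (String × List (String × List String)))
    (sample_size : Int) :
    pick_sample_ogs og_coords og_descriptions sample_size =
      pvOut (PySem.Int.floordiv sample_size 4) "single_gene" (pvSelR og_descriptions 0 og_coords)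
        ++ (pvOut (PySem.Int.floordiv sample_size 4) "tandem" (pvSelR og_descriptions 1 og_coords)
        ++ (pvOut (PySem.Int.floordiv sample_size 4) "multi_copy" (pvSelR og_descriptions 2 og_coords)
        ++ pvOut (PySem.Int.floordiv sample_size 4) "no_irgsp" (pvSelR og_descriptions 3 og_coords))) := by
  unfold pick_sample_ogs pvOut
  simp only [pvFoldA_eq, List.nil_append, List.foldl_cons, List.foldl_nil,
    PySem.List.foldl_append_singleton_eq_map, List.append_assoc]

-- stability of insertion into an already-grouped list
theorem pvInsertBy_append_not {α : Type} (before : α → α → Bool) (x : α) (u v : List α)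
    (h : ∀ y ∈ u, before x y = false) :
    PySem.List.insertBy before x (u ++ v) = u ++ PySem.List.insertBy before x v := by
  induction u with
  | nil => simp
  | cons y u ih =>
    have hy : before x y = false := h y (by simp)
    simp [PySem.List.insertBy, hy, ih (fun z hz => h z (by simp [hz]))]

theorem pvInsertBy_all_true {α : Type} (before : α → α → Bool) (x : α) (v : List α)
    (h : ∀ y ∈ v, before x y = true) :
    PySem.List.insertBy before x v = x :: v := by
  cases v with
  | nil => simp [PySem.List.insertBy]
  | cons y t => simp [PySem.List.insertBy, h y (by simp)]

theorem pvMem_filter_key (l : List (Int × String)) (r : Int) (q : Int × String)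
    (h : q ∈ l.filter (fun w => w.1 == r)) : q.1 = r := by
  have := (List.mem_filter.1 h).2
  simpa using this

theorem pvIns_pvF (x : Int × String) (l : List (Int × String))
    (hx : x.1 = 0 ∨ x.1 = 1 ∨ x.1 = 2 ∨ x.1 = 3) :
    PySem.List.insertBy (fun a b => decide (a.1 < b.1)) x (pvF l) = pvF (l ++ [x]) := by
  have hnot : ∀ (r : Int), r ≤ x.1 → ∀ y ∈ l.filter (fun w => w.1 == r),
      (fun a b => decide (a.1 < b.1)) x y = false := by
    intro r hr y hy
    have := pvMem_filter_key l r y hy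
    simp only [decide_eq_false_iff_not, not_lt, this]
    omega
  have htrue : ∀ (r : Int), x.1 < r → ∀ y ∈ l.filter (fun w => w.1 == r),
      (fun a b => decide (a.1 < b.1)) x y = true := by
    intro r hr y hy
    have := pvMem_filter_key l r y hy
    simp only [decide_eq_true_eq, this]
    omega
  have hF : ∀ (r : Int), (l ++ [x]).filter (fun w => w.1 == r) =
      l.filter (fun w => w.1 == r) ++ (if x.1 == r then [x] else []) := by
    intro r
    by_cases h : x.1 == r <;> simp [List.filter_append, h]
  rcases hx with h0 | h1 | h2 | h3
  · -- x goes right after the rank-0 block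
    unfold pvF
    rw [pvInsertBy_append_not _ _ _ _ (hnot 0 (by omega)),
      pvInsertBy_all_true _ _ _ (by
        intro y hy
        rcases List.mem_append.1 hy with h | h
        · exact htrue 1 (by omega) y h
        · rcases List.mem_append.1 h with h | h
          · exact htrue 2 (by omega) y h
          · exact htrue 3 (by omega) y h)]
    simp [hF, h0]
  · unfold pvF
    rw [pvInsertBy_append_not _ _ _ _ (hnot 0 (by omega)),
      pvInsertBy_append_not _ _ _ _ (hnot 1 (by omega)),
      pvInsertBy_all_true _ _ _ (by
        intro y hy
        rcases List.mem_append.1 hy with h | h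
        · exact htrue 2 (by omega) y h
        · exact htrue 3 (by omega) y h)]
    simp [hF, h1]
  · unfold pvF
    rw [pvInsertBy_append_not _ _ _ _ (hnot 0 (by omega)),
      pvInsertBy_append_not _ _ _ _ (hnot 1 (by omega)),
      pvInsertBy_append_not _ _ _ _ (hnot 2 (by omega)),
      pvInsertBy_all_true _ _ _ (htrue 3 (by omega))]
    simp [hF, h2]
  · unfold pvF
    rw [PySem.List.insertBy_of_forall_not_before _ _ _ (by
      intro y hy
      rcases List.mem_append.1 hy with h | h
      · exact hnot 0 (by omega) y h
      · rcases List.mem_append.1 h with h | h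
        · exact hnot 1 (by omega) y h
        · rcases List.mem_append.1 h with h | h
          · exact hnot 2 (by omega) y h
          · exact hnot 3 (by omega) y h)]
    simp [hF, h3, List.append_assoc]

theorem pvFold_stab (l' : List (Int × String)) (pre : List (Int × String))
    (h : ∀ q ∈ l', q.1 = 0 ∨ q.1 = 1 ∨ q.1 = 2 ∨ q.1 = 3) :
    l'.foldl (fun acc x => PySem.List.insertBy (fun a b => decide (a.1 < b.1)) x acc) (pvF pre)
      = pvF (pre ++ l') := by
  induction l' generalizing pre with
  | nil => simp
  | cons x t ih =>
    simp only [List.foldl_cons]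
    rw [pvIns_pvF x pre (h x (by simp)),
      ih (pre ++ [x]) (fun q hq => h q (by simp [hq]))]
    simp

theorem pvSorted_eq_pvF (l : List (Int × String))
    (h : ∀ q ∈ l, q.1 = 0 ∨ q.1 = 1 ∨ q.1 = 2 ∨ q.1 = 3) :
    PySem.List.sorted l (fun t => t.1) = pvF l := by
  rw [PySem.List.sorted_eq_foldl_insertBy]
  have := pvFold_stab l [] h
  simpa [pvF] using this

theorem pvBlock_eq (d : List (String × List (String × List String)))
    (oc : List (String × List (String × List String))) (r : Int) :
    (oc.map (fun p => (pvRank d p, p.1))).filter (fun w => w.1 == r) =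
      (pvSelR d r oc).map (fun s => ((r : Int), s)) := by
  rw [List.filter_map]
  unfold pvSelR
  rw [List.map_map]
  simp only [Function.comp_def]
  apply List.map_congr_left
  intro p hp
  have : pvRank d p = r := by simpa using (List.mem_filter.1 hp).2
  simp [this]

theorem pvTakeWhile_blocks {α : Type} (p : α → Bool) (u v : List α)
    (hu : ∀ x ∈ u, p x = true) (hv : ∀ x ∈ v, p x = false) :
    (u ++ v).takeWhile p = u ∧ (u ++ v).dropWhile p = v := by
  induction u with
  | nil =>
    cases v with
    | nil => simp
    | cons y t => simp [hv y (by simp)]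
  | cons x u ih =>
    have hx : p x = true := hu x (by simp)
    have := ih (fun z hz => hu z (by simp [hz]))
    simp [hx, this.1, this.2]

theorem pvEmit_block (per : Int) (r : Int) (u : List String) (rest : List (Int × String))
    (hrest : ∀ q ∈ rest, q.1 ≠ r) :
    pvEmitRuns per ((u.map (fun s => ((r : Int), s))) ++ rest) =
      pvOut per (pvCatName r) u ++ pvEmitRuns per rest := by
  cases u with
  | nil => simp [pvOut, PySem.List.slice]
  | cons s u' =>
    rw [List.map_cons, List.cons_append, pvEmitRuns]
    have htw := pvTakeWhile_blocks (fun w => w.1 == r) (u'.map (fun s => ((r : Int), s))) rest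
      (by intro x hx; rcases List.mem_map.1 hx with ⟨y, _, rfl⟩; simp)
      (by intro x hx; simpa using hrest x hx)
    simp only [htw.1, htw.2, List.map_map, pvOut]
    simp

theorem pvMem_block_ne (d : List (String × List (String × List String)))
    (oc : List (String × List (String × List String))) (r r' : Int) (hne : r' ≠ r)
    (q : Int × String) (hq : q ∈ (pvSelR d r' oc).map (fun s => ((r' : Int), s))) :
    q.1 ≠ r := by
  rcases List.mem_map.1 hq with ⟨y, _, rfl⟩
  simpa using hne

theorem pickB_norm (og_coords og_descriptions : List (String × List (String × List String)))
    (sample_size : Int) :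
    pick_sample_ogs_alt og_coords og_descriptions sample_size =
      pvOut (PySem.Int.floordiv sample_size 4) (pvCatName 0) (pvSelR og_descriptions 0 og_coords)
        ++ (pvOut (PySem.Int.floordiv sample_size 4) (pvCatName 1) (pvSelR og_descriptions 1 og_coords)
        ++ (pvOut (PySem.Int.floordiv sample_size 4) (pvCatName 2) (pvSelR og_descriptions 2 og_coords)
        ++ pvOut (PySem.Int.floordiv sample_size 4) (pvCatName 3) (pvSelR og_descriptions 3 og_coords))) := by
  unfold pick_sample_ogs_alt
  rw [pvSorted_eq_pvF _ (by
    intro q hq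
    rcases List.mem_map.1 hq with ⟨p, _, rfl⟩
    exact pvRank_cases og_descriptions p)]
  unfold pvF
  rw [pvBlock_eq, pvBlock_eq, pvBlock_eq, pvBlock_eq]
  rw [pvEmit_block _ 0 _ _ (by
      intro q hq
      rcases List.mem_append.1 hq with h | h
      · exact pvMem_block_ne og_descriptions og_coords 0 1 (by decide) q h
      · rcases List.mem_append.1 h with h | h
        · exact pvMem_block_ne og_descriptions og_coords 0 2 (by decide) q h
        · exact pvMem_block_ne og_descriptions og_coords 0 3 (by decide) q h),
    pvEmit_block _ 1 _ _ (by
      intro q hq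
      rcases List.mem_append.1 hq with h | h
      · exact pvMem_block_ne og_descriptions og_coords 1 2 (by decide) q h
      · exact pvMem_block_ne og_descriptions og_coords 1 3 (by decide) q h),
    pvEmit_block _ 2 _ _ (by
      intro q hq
      exact pvMem_block_ne og_descriptions og_coords 2 3 (by decide) q hq),
    ← List.append_nil ((pvSelR og_descriptions 3 og_coords).map (fun s => ((3 : Int), s))),
    pvEmit_block _ 3 _ _ (by intro q hq; simp at hq)]
  simp [pvEmitRuns]

-- ===== VERDICT (by name: the statement is the Claim_ definition above) =====
theorem pick_sample_ogs_spec : Claim_equal_pick_sample_ogs := by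
  intro og_coords og_descriptions sample_size _
  unfold Spec_pick_sample_ogs
  rw [pickA_norm, pickB_norm]
  rfl
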